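-- pv_equiv track=rewrite | github.com/isierra93/UTN-TUPaD-P1 | Matemática/integradorMatePunto1Corregido.py | frecuencia
-- ===== SOURCE A (Python) =====
-- def frecuencia(dni):
--     unicos = []
--     frecuencia = []
--     respuesta = []
--     for num in dni:
--         if num in unicos:
--             indice = unicos.index(num)
--             frecuencia[indice] += 1
--         else:
--             unicos.append(num)
--             frecuencia.append(1)
--     respuesta.append(unicos)
--     respuesta.append(frecuencia)
--     return respuesta
-- ===== SOURCE B (Python) =====
-- def frecuencia(dni):
--     dni = list(dni)
--     unicos = list(dict.fromkeys(dni))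
--     conteos = [dni.count(x) for x in unicos]
--     return [unicos, conteos]
-- ===== Notes on version B (the rewrite author's own statement) =====
-- stated objective: alternative
-- what changed: Replaces A's single interleaved pass (membership test + .index to bump a parallel count list per element) with two staged passes: first build the distinct values in first-appearance order via dict.fromkeys, then count each distinct value with a separate full scan of the input.
import Mathlib
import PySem

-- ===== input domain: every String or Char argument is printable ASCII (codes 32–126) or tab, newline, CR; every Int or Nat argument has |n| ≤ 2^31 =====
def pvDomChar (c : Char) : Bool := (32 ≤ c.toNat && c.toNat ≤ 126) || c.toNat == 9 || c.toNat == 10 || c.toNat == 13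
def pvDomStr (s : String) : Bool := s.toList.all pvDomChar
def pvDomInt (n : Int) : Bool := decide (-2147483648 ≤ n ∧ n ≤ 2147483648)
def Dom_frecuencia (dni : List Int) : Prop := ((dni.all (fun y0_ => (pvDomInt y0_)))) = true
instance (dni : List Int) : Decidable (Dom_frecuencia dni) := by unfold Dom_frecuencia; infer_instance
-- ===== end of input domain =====

-- B replaces A's single interleaved counting pass by two staged passes: an ordered
-- dedup (dict.fromkeys), then one full .count scan per distinct value (objective: alternative).

-- ===== PORT A =====
-- one loop iteration: membership test, .index, frecuencia[indice] += 1 / two appends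
-- (List.modify i is exact here: the index returned by .index is always in range since
--  unicos and frecuencia have equal length throughout, so Python never raises)
def frecStep (st : List Int × List Int) (num : Int) : List Int × List Int :=
  if num ∈ st.1 then
    match PySem.List.index? st.1 num with
    | some i => (st.1, st.2.modify i (· + 1))
    | none => st
  else (st.1 ++ [num], st.2 ++ [(1 : Int)])

def frecuencia (dni : List Int) : List (List Int) :=
  let st := dni.foldl frecStep ([], [])
  [st.1, st.2]

-- ===== PORT B =====
-- dict.fromkeys → PySem.List.dedup (first occurrences, in order); dni.count x → List.count
def frecuencia_alt (dni : List Int) : List (List Int) :=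
  let unicos := PySem.List.dedup dni
  let conteos := unicos.map (fun x => (dni.count x : Int))
  [unicos, conteos]

-- ===== PRECONDITION & SPEC =====
def Spec_frecuencia (dni : List Int) (out : List (List Int)) : Prop := out = frecuencia_alt dni
instance (dni : List Int) (out : List (List Int)) : Decidable (Spec_frecuencia dni out) := by unfold Spec_frecuencia; infer_instance

-- ===== CLAIM (what is proved, stated in full; the proofs are below) =====
def Claim_equal_frecuencia : Prop := ∀ (dni : List Int), Dom_frecuencia dni → Spec_frecuencia dni (frecuencia dni)

-- ===== LEMMAS AND PROOFS =====

lemma dedup_append_singleton (p : List Int) (x : Int) :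
    PySem.List.dedup (p ++ [x]) = PySem.Set.add (PySem.List.dedup p) x := by
  simp [PySem.List.dedup_eq_ofList, PySem.Set.ofList_eq_foldl, List.foldl_append]

lemma count_append_singleton (p : List Int) (x y : Int) :
    List.count y (p ++ [x]) = List.count y p + if y = x then 1 else 0 := by
  rcases eq_or_ne y x with h | h
  · subst h; simp [List.count_append]
  · simp [List.count_append, h, Ne.symm h]

lemma frec_step (p : List Int) (x : Int) :
    frecStep (PySem.List.dedup p,
        (PySem.List.dedup p).map (fun y => (p.count y : Int))) x
      = (PySem.List.dedup (p ++ [x]),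
        (PySem.List.dedup (p ++ [x])).map (fun y => ((p ++ [x]).count y : Int))) := by
  have hnd : (PySem.List.dedup p).Nodup := PySem.List.nodup_dedup p
  by_cases hx : x ∈ PySem.List.dedup p
  · have hxp : x ∈ p := (PySem.List.mem_dedup p x).mp hx
    have hdd : PySem.List.dedup (p ++ [x]) = PySem.List.dedup p := by
      rw [dedup_append_singleton]
      simp [PySem.Set.add, PySem.Set.contains, hxp]
    obtain ⟨i, hi⟩ := Option.isSome_iff_exists.mp
      ((PySem.List.index?_isSome_iff (PySem.List.dedup p) x).mpr hx)
    obtain ⟨hilt, hix, -⟩ := PySem.List.getElem_of_index?_eq_some hi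
    rw [hdd]
    unfold frecStep
    rw [if_pos hx, hi]
    refine Prod.ext rfl ?_
    apply List.ext_getElem
    · simp
    · intro j hj1 hj2
      simp only [List.length_modify, List.length_map] at hj1
      rw [List.getElem_modify]
      by_cases hji : i = j
      · subst hji
        simp only [List.getElem_map, hix, count_append_singleton]
        simp
      · rw [if_neg hji]
        have hne : (PySem.List.dedup p)[i] = x := hix
        have hnej : (PySem.List.dedup p)[j] ≠ x := fun h =>
          hji ((hnd.getElem_inj_iff.mp (h.trans hne.symm)).symm)
        simp only [List.getElem_map, count_append_singleton]
        rw [if_neg (by simpa using hnej)]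
        simp
  · have hxp : x ∉ p := fun h => hx ((PySem.List.mem_dedup p x).mpr h)
    have hdd : PySem.List.dedup (p ++ [x]) = PySem.List.dedup p ++ [x] := by
      rw [dedup_append_singleton]
      simp [PySem.Set.add, PySem.Set.contains, hxp]
    rw [hdd]
    unfold frecStep
    rw [if_neg hx]
    refine Prod.ext rfl ?_
    simp only [List.map_append, List.map_cons, List.map_nil]
    congr 1
    · apply List.map_congr_left
      intro y hy
      have hyp : y ∈ p := (PySem.List.mem_dedup p y).mp hy
      have hne : y ≠ x := fun h => hxp (h ▸ hyp)
      rw [count_append_singleton, if_neg hne]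
      simp
    · rw [count_append_singleton, if_pos rfl,
        List.count_eq_zero_of_not_mem hxp]
      simp

lemma frec_inv (l p : List Int) :
    l.foldl frecStep (PySem.List.dedup p,
        (PySem.List.dedup p).map (fun x => (p.count x : Int)))
      = (PySem.List.dedup (p ++ l),
        (PySem.List.dedup (p ++ l)).map (fun x => ((p ++ l).count x : Int))) := by
  induction l generalizing p with
  | nil => simp
  | cons x l ih =>
    have hstep : frecStep (PySem.List.dedup p,
        (PySem.List.dedup p).map (fun y => (p.count y : Int))) x
        = (PySem.List.dedup (p ++ [x]),
          (PySem.List.dedup (p ++ [x])).map (fun y => ((p ++ [x]).count y : Int))) := frec_step p x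
    have : p ++ x :: l = (p ++ [x]) ++ l := by simp
    rw [List.foldl_cons, hstep, this, ih (p ++ [x])]

-- ===== VERDICT (by name: the statement is the Claim_ definition above) =====
theorem frecuencia_spec : Claim_equal_frecuencia := by
  intro dni _
  unfold Spec_frecuencia frecuencia frecuencia_alt
  have h := frec_inv dni []
  simp only [List.nil_append] at h
  have h' : List.foldl frecStep (([], []) : List Int × List Int) dni
      = (PySem.List.dedup dni, (PySem.List.dedup dni).map (fun x => (dni.count x : Int))) := h
  simp [h']
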